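-- pv_equiv track=rewrite | github.com/ThoberDetofeno/python-challenges | code_challenge/is_economical.py | is_economical
-- ===== SOURCE A (Python) =====
-- def is_economical(n):
--     def nextPrimeNumber(prime):
--         nextPrime = prime + 1
--         while True:
--             if isPrime(nextPrime):
--                 return nextPrime
--             nextPrime += 1
--
--     def isPrime(num):
--         for i in range(2,num):
--             if num % i == 0:
--                 return False
--         return True
--
--     def numberOfDigits(listOfDigits):
--         num = 0
--         for p in set(listOfDigits):
--             num += len(str(p))
--             if listOfDigits.count(p) > 1:
--                 num += len(str(listOfDigits.count(p)))
--         return num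
--     #
--     digits = []
--     rest = n
--     prime = 2
--     while rest != 1:
--         if rest%prime == 0:
--             rest = int(rest/prime)
--             digits.append(prime)
--         else:
--             prime = nextPrimeNumber(prime)
--     #
--     numDigits = numberOfDigits(digits)
--
--     if len(str(n)) == numDigits:
--         return "Equidigital"
--     if len(str(n)) > numDigits:
--         return "Frugal"
--     return "Wasteful"
-- ===== SOURCE B (Python) =====
-- def is_economical(n):
--     rest = n
--     fd = 0
--     d = 2
--     while d * d <= rest:
--         if rest % d == 0:
--             e = 0
--             while rest % d == 0:
--                 rest //= d
--                 e += 1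
--             fd += len(str(d))
--             if e > 1:
--                 fd += len(str(e))
--         d += 1
--     if rest > 1:
--         fd += len(str(rest))
--     nd = len(str(n))
--     if nd == fd:
--         return "Equidigital"
--     if nd > fd:
--         return "Frugal"
--     return "Wasteful"
-- ===== Notes on version B (the rewrite author's own statement) =====
-- stated objective: faster
-- what changed: Replaces the per-candidate O(p) primality test and one-division-at-a-time loop with plain trial division up to sqrt(rest) that strips each divisor completely and counts digits on the fly, so no primality test, no factor list and no counting pass are needed.
-- outside the precondition, e.g. on is_economical(0): A does not finish within the time limit, B returns 'Frugal'
import Mathlib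
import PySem

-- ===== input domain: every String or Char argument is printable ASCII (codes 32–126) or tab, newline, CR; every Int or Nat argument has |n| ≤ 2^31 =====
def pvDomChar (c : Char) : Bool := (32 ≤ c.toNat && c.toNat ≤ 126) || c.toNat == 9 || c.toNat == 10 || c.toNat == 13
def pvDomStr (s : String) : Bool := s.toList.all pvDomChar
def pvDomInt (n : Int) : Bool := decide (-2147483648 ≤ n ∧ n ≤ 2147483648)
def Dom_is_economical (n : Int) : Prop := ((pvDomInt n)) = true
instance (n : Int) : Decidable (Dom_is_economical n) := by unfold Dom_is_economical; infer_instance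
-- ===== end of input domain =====

-- B replaces A's per-candidate primality scan and one-factor-at-a-time division loop by plain
-- trial division up to sqrt(rest) (objective: faster — intended asymptotic speed-up).


-- ===== PORT A =====
def pvIsPrimeA (num : Int) : Bool :=
  (PySem.List.pyRange 2 num 1).all (fun i => !(PySem.Int.mod num i == 0))

-- fuel makes the unbounded 'while True' search total; the ports always call it with enough fuel
def pvNextPrimeA : Nat → Int → Int
  | 0, cand => cand
  | fuel+1, cand => if pvIsPrimeA cand then cand else pvNextPrimeA fuel (cand + 1)

def pvLoopA : Nat → Int → Int → List Int → List Int
  | 0, _, _, digits => digits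
  | fuel+1, rest, prime, digits =>
    if rest ≠ 1 then
      if PySem.Int.mod rest prime = 0 then
        pvLoopA fuel (PySem.Int.floordiv rest prime) prime (digits ++ [prime])
      else
        pvLoopA fuel rest (pvNextPrimeA (2 * (prime + 1) + 4).toNat (prime + 1)) digits
    else digits

def pvNumberOfDigitsA (l : List Int) : Int :=
  (PySem.Set.ofList l).foldl (fun num p =>
    let num := num + ((PySem.Int.toChars p).length : Int)
    if ((PySem.List.count l p : Int) > 1) then
      num + ((PySem.Int.toChars ((PySem.List.count l p : Nat) : Int)).length : Int)
    else num) 0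

def is_economical (n : Int) : String :=
  let digits := pvLoopA (2 * n + 4).toNat n 2 []
  let numDigits := pvNumberOfDigitsA digits
  if ((PySem.Int.toChars n).length : Int) = numDigits then "Equidigital"
  else if ((PySem.Int.toChars n).length : Int) > numDigits then "Frugal"
  else "Wasteful"

-- ===== PORT B =====
def pvDivOutB : Nat → Int → Int → Int → Int × Int
  | 0, rest, _, e => (rest, e)
  | fuel+1, rest, d, e =>
    if PySem.Int.mod rest d = 0 then
      pvDivOutB fuel (PySem.Int.floordiv rest d) d (e + 1)
    else (rest, e)

def pvLoopB : Nat → Int → Int → Int → Int × Int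
  | 0, rest, _, fd => (rest, fd)
  | fuel+1, rest, d, fd =>
    if d * d ≤ rest then
      (if PySem.Int.mod rest d = 0 then
        let r := pvDivOutB (rest.toNat + 1) rest d 0
        let fd := fd + ((PySem.Int.toChars d).length : Int)
        let fd := if r.2 > 1 then fd + ((PySem.Int.toChars r.2).length : Int) else fd
        pvLoopB fuel r.1 (d + 1) fd
      else pvLoopB fuel rest (d + 1) fd)
    else (rest, fd)

def is_economical_alt (n : Int) : String :=
  let res := pvLoopB (n + 4).toNat n 2 0
  let fd := if res.1 > 1 then res.2 + ((PySem.Int.toChars res.1).length : Int) else res.2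
  let nd : Int := ((PySem.Int.toChars n).length : Int)
  if nd = fd then "Equidigital"
  else if nd > fd then "Frugal"
  else "Wasteful"

-- ===== PRECONDITION & SPEC =====
-- Pre_ excludes n ≤ 0, on which A's while loop never terminates (no value is returned).

-- ===== PRECONDITION & SPEC =====
-- Pre_ excludes n <= 0: there A's 'while rest != 1' loop never terminates (A returns no value).
def Pre_is_economical (n : Int) : Prop := 1 ≤ n
instance (n : Int) : Decidable (Pre_is_economical n) := by unfold Pre_is_economical; infer_instance
def pvWitness_is_economical : Int := 12

def Spec_is_economical (n : Int) (out : String) : Prop := out = is_economical_alt n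
instance (n : Int) (out : String) : Decidable (Spec_is_economical n out) := by unfold Spec_is_economical; infer_instance

-- ===== CLAIM (what is proved, stated in full; the proofs are below) =====
def Claim_equal_is_economical : Prop := ∀ (n : Int), Dom_is_economical n → Pre_is_economical n → Spec_is_economical n (is_economical n)

-- ===== LEMMAS AND PROOFS =====

-- the least prime >= c (the value A's nextPrimeNumber search returns)
def pvNp (c : Nat) : Nat := Nat.find (Nat.exists_infinite_primes c)

def pvFInc (p e : Nat) : Int :=
  ((PySem.Int.toChars (p : Int)).length : Int) +
    (if 1 < e then ((PySem.Int.toChars (e : Int)).length : Int) else 0)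

def pvS (l : List Nat) : Int :=
  ((PySem.List.dedup l).map (fun p => pvFInc p (PySem.List.count l p))).sum

def pvWrapB (r : Int × Int) : Int :=
  if r.1 > 1 then r.2 + ((PySem.Int.toChars r.1).length : Int) else r.2

theorem pvIsPrimeA_iff (k : Nat) (hk : 2 ≤ k) : (pvIsPrimeA (k : Int) = true ↔ Nat.Prime k) := by
  rw [Nat.prime_def_lt']
  unfold pvIsPrimeA
  simp only [List.all_eq_true, Bool.not_eq_true', beq_eq_false_iff_ne, ne_eq]
  constructor
  · intro h
    refine ⟨hk, fun j h2 hjk hdvd => ?_⟩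
    have hmem : (j : Int) ∈ PySem.List.pyRange 2 (k : Int) 1 := by
      rw [PySem.List.mem_pyRange_one]; constructor <;> [exact_mod_cast h2; exact_mod_cast hjk]
    have h' := h _ hmem
    rw [PySem.Int.mod_natCast] at h'
    have hkj : k % j = 0 := Nat.dvd_iff_mod_eq_zero.mp hdvd
    exact h' (by exact_mod_cast hkj)
  · intro ⟨_, h⟩ i hmem
    rw [PySem.List.mem_pyRange_one] at hmem
    obtain ⟨j, rfl⟩ : ∃ j : Nat, i = (j : Int) := ⟨i.toNat, by omega⟩
    rw [PySem.Int.mod_natCast]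
    intro hz
    have hz' : k % j = 0 := by exact_mod_cast hz
    exact h j (by exact_mod_cast hmem.1) (by exact_mod_cast hmem.2) (Nat.dvd_of_mod_eq_zero hz')

theorem pvNp_ge (c : Nat) : c ≤ pvNp c := (Nat.find_spec (Nat.exists_infinite_primes c)).1
theorem pvNp_prime (c : Nat) : Nat.Prime (pvNp c) := (Nat.find_spec (Nat.exists_infinite_primes c)).2
theorem pvNp_min {c q : Nat} (hq : Nat.Prime q) (hcq : c ≤ q) : pvNp c ≤ q :=
  Nat.find_min' (Nat.exists_infinite_primes c) ⟨hcq, hq⟩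

theorem pvNextPrimeA_eq : ∀ (F c : Nat), 2 ≤ c → pvNp c < c + F →
    pvNextPrimeA F (c : Int) = ((pvNp c : Nat) : Int) := by
  intro F
  induction F with
  | zero => intro c h2 hF; exact absurd (pvNp_ge c) (by omega)
  | succ F ih =>
    intro c h2 hF
    show (if pvIsPrimeA (c : Int) then (c : Int) else pvNextPrimeA F ((c : Int) + 1)) = _
    by_cases hp : Nat.Prime c
    · rw [if_pos ((pvIsPrimeA_iff c h2).mpr hp)]
      have h1 : pvNp c ≤ c := pvNp_min hp le_rfl
      have h2' : c ≤ pvNp c := pvNp_ge c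
      have heq : pvNp c = c := Nat.le_antisymm h1 h2'
      rw [heq]
    · rw [if_neg (by simp [pvIsPrimeA_iff c h2, hp])]
      have key : pvNp (c + 1) = pvNp c := by
        have ha : c + 1 ≤ pvNp c := by
          have := pvNp_ge c
          rcases Nat.eq_or_lt_of_le this with h | h
          · exact absurd (h ▸ pvNp_prime c) hp
          · omega
        exact Nat.le_antisymm (pvNp_min (pvNp_prime c) ha)
          (pvNp_min (pvNp_prime (c + 1)) (le_trans (by omega) (pvNp_ge (c + 1))))
      have hcast : ((c : Int) + 1) = ((c + 1 : Nat) : Int) := by push_cast; ring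
      rw [hcast, ih (c + 1) (by omega) (by omega), key]

def pvCast (l : List Nat) : List Int := List.map (fun x : Nat => (x : Int)) l

theorem pvCast_cons (a : Nat) (l : List Nat) : pvCast (a :: l) = ((a : Int)) :: pvCast l := rfl

theorem pvPfCons (m : Nat) (h : 2 ≤ m) :
    Nat.primeFactorsList m = m.minFac :: Nat.primeFactorsList (m / m.minFac) := by
  obtain ⟨k, rfl⟩ : ∃ k, m = k + 2 := ⟨m - 2, by omega⟩
  exact Nat.primeFactorsList_add_two k

theorem pvLoopA_eq : ∀ (fuel : Nat) (m p : Nat) (acc : List Int), 1 ≤ m → 2 ≤ p → Nat.Prime p →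
    (∀ q, Nat.Prime q → q < p → ¬ q ∣ m) → 2 * m + 2 - p < fuel →
    pvLoopA fuel (m : Int) (p : Int) acc = acc ++ pvCast (Nat.primeFactorsList m) := by
  intro fuel
  induction fuel with
  | zero => intro m p acc h1 h2 hp hinv hF; omega
  | succ fuel ih =>
    intro m p acc h1 h2 hp hinv hF
    show (if (m : Int) ≠ 1 then _ else acc) = _
    by_cases hm1 : m = 1
    · subst hm1; simp [Nat.primeFactorsList_one, pvCast]
    · have hm2 : 2 ≤ m := by omega
      rw [if_pos (by exact_mod_cast hm1 ∘ fun h => by exact_mod_cast h)]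
      have hmfp : Nat.Prime m.minFac := Nat.minFac_prime (by omega)
      have hmfd : m.minFac ∣ m := Nat.minFac_dvd m
      have hmfge : p ≤ m.minFac := by
        by_contra h
        exact hinv _ hmfp (by omega) hmfd
      have hmfle : m.minFac ≤ m := Nat.minFac_le (by omega)
      rw [PySem.Int.mod_natCast]
      by_cases hdvd : p ∣ m
      · have hpmf : p = m.minFac := Nat.le_antisymm hmfge (Nat.minFac_le_of_dvd h2 hdvd)
        rw [if_pos (by exact_mod_cast (Nat.dvd_iff_mod_eq_zero).mp hdvd)]
        rw [PySem.Int.floordiv_natCast]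
        have hq1 : 1 ≤ m / p := (Nat.one_le_div_iff (by omega)).mpr (Nat.le_of_dvd (by omega) hdvd)
        have hdd : m / p ∣ m := Nat.div_dvd_of_dvd hdvd
        have hhalf : m / p ≤ m / 2 := Nat.div_le_div_left h2 (by omega)
        have h22 : m / 2 * 2 ≤ m := Nat.div_mul_le_self m 2
        rw [ih (m / p) p (acc ++ [(p : Int)]) hq1 h2 hp
          (fun q hq hql hqd => hinv q hq hql (hqd.trans hdd)) (by omega)]
        rw [hpmf, pvPfCons m hm2, pvCast_cons]
        simp
      · rw [if_neg (by exact_mod_cast fun h => hdvd (Nat.dvd_of_mod_eq_zero (by exact_mod_cast h)))]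
        have hc : ((p : Int) + 1) = ((p + 1 : Nat) : Int) := by push_cast; ring
        have hmfgt : p + 1 ≤ m.minFac := by
          rcases Nat.eq_or_lt_of_le hmfge with h | h
          · exact absurd (h ▸ hmfd) hdvd
          · omega
        have hnp : pvNp (p + 1) ≤ m.minFac := pvNp_min hmfp hmfgt
        have hnpge : p + 1 ≤ pvNp (p + 1) := pvNp_ge (p + 1)
        obtain ⟨qb, hqbp, hqbgt, hqble⟩ := Nat.exists_prime_lt_and_le_two_mul p (by omega)
        have hbert : pvNp (p + 1) ≤ 2 * p := le_trans (pvNp_min hqbp (by omega)) hqble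
        rw [hc]
        have hfc : (2 * ((p + 1 : Nat) : Int) + 4).toNat = 2 * (p + 1) + 4 := by omega
        rw [hfc, pvNextPrimeA_eq (2 * (p + 1) + 4) (p + 1) (by omega) (by omega)]
        refine ih m (pvNp (p + 1)) acc h1 (by omega) (pvNp_prime _) ?_ (by omega)
        intro q hq hql hqd
        by_cases hqp : q < p
        · exact hinv q hq hqp hqd
        · have hq1 : p + 1 ≤ q := by
            rcases Nat.lt_or_ge q (p + 1) with h | h
            · have hqep : q = p := by omega
              exact absurd (hqep ▸ hqd) hdvd
            · exact h
          exact absurd (pvNp_min hq hq1) (by omega)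

theorem pvFoldlAddCons : ∀ (l : List Nat) (s : List Nat) (d : Nat), d ∉ l →
    List.foldl PySem.Set.add (d :: s) l = d :: List.foldl PySem.Set.add s l := by
  intro l
  induction l with
  | nil => intro s d _; rfl
  | cons a l ih =>
    intro s d hd
    have had : a ≠ d := fun h => hd (h ▸ List.mem_cons_self)
    have hstep : PySem.Set.add (d :: s) a = d :: PySem.Set.add s a := by
      unfold PySem.Set.add
      have hcc : PySem.Set.contains (d :: s) a = PySem.Set.contains s a := by
        simp [PySem.Set.contains, had]
      rw [hcc]
      by_cases hc : PySem.Set.contains s a = true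
      · rw [if_pos hc, if_pos hc]
      · rw [if_neg hc, if_neg hc]; rfl
    rw [List.foldl_cons, List.foldl_cons, hstep, ih _ _ (fun h => hd (List.mem_cons_of_mem _ h))]

theorem pvFoldlAddReplicate (d : Nat) : ∀ (e : Nat) (s : List Nat), d ∈ s →
    List.foldl PySem.Set.add s (List.replicate e d) = s := by
  intro e
  induction e with
  | zero => intro s _; rfl
  | succ e ih =>
    intro s hs
    rw [List.replicate_succ, List.foldl_cons, PySem.Set.add_of_mem hs]
    exact ih s hs

theorem pvDedupReplicateAppend (d e : Nat) (l : List Nat) (he : 1 ≤ e) (hd : d ∉ l) :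
    PySem.List.dedup (List.replicate e d ++ l) = d :: PySem.List.dedup l := by
  rw [PySem.List.dedup_eq_ofList, PySem.List.dedup_eq_ofList, PySem.Set.ofList_eq_foldl,
    PySem.Set.ofList_eq_foldl, List.foldl_append]
  obtain ⟨e', rfl⟩ : ∃ e', e = e' + 1 := ⟨e - 1, by omega⟩
  rw [List.replicate_succ, List.foldl_cons]
  have h1 : PySem.Set.add ([] : List Nat) d = [d] := rfl
  rw [h1, pvFoldlAddReplicate d e' [d] (by simp)]
  exact pvFoldlAddCons l [] d hd

theorem pvS_split (d e : Nat) (l : List Nat) (he : 1 ≤ e) (hd : d ∉ l) :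
    pvS (List.replicate e d ++ l) = pvFInc d e + pvS l := by
  unfold pvS
  rw [pvDedupReplicateAppend d e l he hd, List.map_cons, List.sum_cons]
  have hcnt : PySem.List.count (List.replicate e d ++ l) d = e := by
    rw [PySem.List.count_eq, List.count_append, List.count_replicate,
      if_pos (beq_self_eq_true d), List.count_eq_zero_of_not_mem (by simpa using hd)]
    omega
  rw [hcnt]
  congr 1
  apply congrArg List.sum
  apply List.map_congr_left
  intro p hp
  have hpl : p ∈ l := by
    exact (PySem.List.mem_dedup l p).mp hp
  have hpd : p ≠ d := fun h => hd (h ▸ hpl)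
  rw [PySem.List.count_eq, PySem.List.count_eq, List.count_append, List.count_replicate,
    if_neg (by simpa using (Ne.symm hpd)), Nat.zero_add]

theorem pvCast_add (s : List Nat) (a : Nat) :
    pvCast (PySem.Set.add s a) = PySem.Set.add (pvCast s) ((a : Int)) := by
  have hc : PySem.Set.contains (pvCast s) ((a : Int)) = PySem.Set.contains s a := by
    apply Bool.eq_iff_iff.mpr
    rw [PySem.Set.contains_iff, PySem.Set.contains_iff]
    unfold pvCast
    exact List.mem_map_of_injective (fun x y h => by exact_mod_cast h)
  unfold PySem.Set.add
  rw [hc]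
  by_cases h : PySem.Set.contains s a = true
  · rw [if_pos h, if_pos h]
  · rw [if_neg h, if_neg h]; unfold pvCast; rw [List.map_append]; rfl

theorem pvFoldlAddMap : ∀ (l s : List Nat),
    List.foldl PySem.Set.add (pvCast s) (pvCast l) = pvCast (List.foldl PySem.Set.add s l) := by
  intro l
  induction l with
  | nil => intro s; rfl
  | cons a l ih =>
    intro s
    rw [pvCast_cons, List.foldl_cons, List.foldl_cons, ← pvCast_add, ih]

theorem pvNumberOfDigitsA_eq (l : List Nat) :
    pvNumberOfDigitsA (pvCast l) = pvS l := by
  unfold pvNumberOfDigitsA pvS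
  rw [PySem.Set.ofList_eq_foldl]
  have h0 : ([] : List Int) = pvCast [] := rfl
  rw [h0, pvFoldlAddMap l [], ← PySem.Set.ofList_eq_foldl, ← PySem.List.dedup_eq_ofList]
  show List.foldl _ 0 (List.map (fun x : Nat => (x : Int)) (PySem.List.dedup l)) = _
  rw [List.foldl_map]
  have hbody : (fun (num : Int) (x : Nat) =>
      (let num' := num + ((PySem.Int.toChars ((x : Int))).length : Int);
       if ((PySem.List.count (pvCast l) ((x : Int)) : Int) > 1) then
         num' + ((PySem.Int.toChars ((PySem.List.count (pvCast l) ((x : Int)) : Nat) : Int)).length : Int)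
       else num')) = fun (num : Int) (x : Nat) => num + pvFInc x (PySem.List.count l x) := by
    funext num x
    have hcnt : PySem.List.count (pvCast l) ((x : Int)) = PySem.List.count l x := by
      rw [PySem.List.count_eq, PySem.List.count_eq]
      unfold pvCast
      exact List.count_map_of_injective l _ (fun a b h => by exact_mod_cast h) x
    simp only [hcnt, pvFInc]
    by_cases h : 1 < PySem.List.count l x
    · rw [if_pos (by exact_mod_cast h), if_pos h]; ring
    · rw [if_neg (by exact_mod_cast h), if_neg h]; ring
  rw [hbody, PySem.List.foldl_add]
  ring

theorem pvDivOutB_eq : ∀ (fuel : Nat) (m d : Nat) (e0 : Int), 1 ≤ m → 2 ≤ d →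
    (∀ k, 2 ≤ k → k < d → ¬ k ∣ m) → m < fuel →
    ∃ m' e : Nat, pvDivOutB fuel (m : Int) (d : Int) e0 = ((m' : Int), e0 + (e : Int)) ∧
      1 ≤ m' ∧ ¬ d ∣ m' ∧
      Nat.primeFactorsList m = List.replicate e d ++ Nat.primeFactorsList m' ∧
      m' ∣ m ∧ (d ∣ m → 1 ≤ e) := by
  intro fuel
  induction fuel with
  | zero => intro m d e0 h1 h2 hinv hF; omega
  | succ fuel ih =>
    intro m d e0 h1 h2 hinv hF
    simp only [pvDivOutB]
    by_cases hdvd : d ∣ m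
    · rw [if_pos (by rw [PySem.Int.mod_natCast]; exact_mod_cast Nat.dvd_iff_mod_eq_zero.mp hdvd),
        PySem.Int.floordiv_natCast]
      have hdle : d ≤ m := Nat.le_of_dvd (by omega) hdvd
      have hm2 : 2 ≤ m := by omega
      have hq1 : 1 ≤ m / d := (Nat.one_le_div_iff (by omega)).mpr hdle
      have hqlt : m / d < m := Nat.div_lt_self (by omega) (by omega)
      have hinv' : ∀ k, 2 ≤ k → k < d → ¬ k ∣ m / d :=
        fun k hk2 hkd hkdvd => hinv k hk2 hkd (hkdvd.trans (Nat.div_dvd_of_dvd hdvd))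
      obtain ⟨m', e, heq, hm'1, hndvd, hpf, hm'dvd, _⟩ :=
        ih (m / d) d (e0 + 1) hq1 h2 hinv' (by omega)
      refine ⟨m', e + 1, ?_, hm'1, hndvd, ?_, hm'dvd.trans (Nat.div_dvd_of_dvd hdvd), fun _ => by omega⟩
      · rw [heq]
        have hcst : e0 + 1 + (e : Int) = e0 + ((e + 1 : Nat) : Int) := by push_cast; ring
        rw [hcst]
      · have hmf : d = m.minFac := by
          have hmfp : Nat.Prime m.minFac := Nat.minFac_prime (by omega)
          have ha : m.minFac ≤ d := Nat.minFac_le_of_dvd h2 hdvd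
          have hb : ¬ m.minFac < d := fun h => hinv _ hmfp.two_le h (Nat.minFac_dvd m)
          omega
        rw [pvPfCons m hm2, ← hmf, hpf, List.replicate_succ]
        rfl
    · rw [if_neg (by rw [PySem.Int.mod_natCast]; exact_mod_cast fun h => hdvd (Nat.dvd_of_mod_eq_zero (by exact_mod_cast h)))]
      refine ⟨m, 0, ?_, h1, hdvd, by simp, dvd_refl m, fun h => absurd h hdvd⟩
      simp

theorem pvLoopB_eq : ∀ (fuel : Nat) (m d : Nat) (fd : Int), 1 ≤ m → 2 ≤ d →
    (∀ k, 2 ≤ k → k < d → ¬ k ∣ m) → m + 2 - d < fuel →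
    pvWrapB (pvLoopB fuel (m : Int) (d : Int) fd) = fd + pvS (Nat.primeFactorsList m) := by
  intro fuel
  induction fuel with
  | zero => intro m d fd h1 h2 hinv hF; omega
  | succ fuel ih =>
    intro m d fd h1 h2 hinv hF
    simp only [pvLoopB]
    by_cases hguard : (d : Int) * (d : Int) ≤ (m : Int)
    · rw [if_pos hguard]
      have hdd : d * d ≤ m := by exact_mod_cast hguard
      have hdm : d ≤ m := le_trans (Nat.le_mul_of_pos_left d (by omega)) hdd
      by_cases hdvd : d ∣ m
      · rw [if_pos (by rw [PySem.Int.mod_natCast]; exact_mod_cast Nat.dvd_iff_mod_eq_zero.mp hdvd)]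
        have htn : ((m : Int)).toNat + 1 = m + 1 := by omega
        rw [htn]
        obtain ⟨m', e, heq, hm'1, hndvd, hpf, hm'dvd, hme⟩ :=
          pvDivOutB_eq (m + 1) m d 0 h1 h2 hinv (by omega)
        have he1 : 1 ≤ e := hme hdvd
        have hm'ne : m' ≠ m := fun h => hndvd (h ▸ hdvd)
        have hm'lt : m' < m := lt_of_le_of_ne (Nat.le_of_dvd (by omega) hm'dvd) hm'ne
        have hinv' : ∀ k, 2 ≤ k → k < d + 1 → ¬ k ∣ m' := by
          intro k hk2 hkd hkdvd
          rcases Nat.lt_or_ge k d with h | h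
          · exact hinv k hk2 h (hkdvd.trans hm'dvd)
          · have hkd' : k = d := by omega
            exact hndvd (hkd' ▸ hkdvd)
        simp only [heq, zero_add]
        have hc1 : ((d : Int) + 1) = ((d + 1 : Nat) : Int) := by push_cast; ring
        have hfd : (if ((e : Int)) > 1 then
            fd + ((PySem.Int.toChars (d : Int)).length : Int) + ((PySem.Int.toChars ((e : Int))).length : Int)
          else fd + ((PySem.Int.toChars (d : Int)).length : Int)) = fd + pvFInc d e := by
          unfold pvFInc
          by_cases h : 1 < e
          · rw [if_pos (by exact_mod_cast h), if_pos h]; ring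
          · rw [if_neg (by exact_mod_cast h), if_neg h]; ring
        rw [hfd, hc1, ih m' (d + 1) (fd + pvFInc d e) hm'1 (by omega) hinv' (by omega)]
        have hnotmem : d ∉ Nat.primeFactorsList m' :=
          fun h => hndvd (Nat.dvd_of_mem_primeFactorsList h)
        rw [hpf, pvS_split d e _ he1 hnotmem]
        ring
      · rw [if_neg (by rw [PySem.Int.mod_natCast]; exact_mod_cast fun h => hdvd (Nat.dvd_of_mod_eq_zero (by exact_mod_cast h)))]
        have hinv' : ∀ k, 2 ≤ k → k < d + 1 → ¬ k ∣ m := by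
          intro k hk2 hkd hkdvd
          rcases Nat.lt_or_ge k d with h | h
          · exact hinv k hk2 h hkdvd
          · have hkd' : k = d := by omega
            exact hdvd (hkd' ▸ hkdvd)
        have hc1 : ((d : Int) + 1) = ((d + 1 : Nat) : Int) := by push_cast; ring
        rw [hc1, ih m (d + 1) fd h1 (by omega) hinv' (by omega)]
    · rw [if_neg hguard]
      have hdd : ¬ (d * d ≤ m) := fun h => hguard (by exact_mod_cast h)
      by_cases hm1 : m = 1
      · subst hm1
        show pvWrapB ((1 : Int), fd) = _
        unfold pvWrapB
        simp [Nat.primeFactorsList_one, pvS]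
      · have hm2 : 2 ≤ m := by omega
        have hprime : Nat.Prime m := by
          by_contra hnp
          have hsq : m.minFac ^ 2 ≤ m := Nat.minFac_sq_le_self (by omega) hnp
          have hmfp : Nat.Prime m.minFac := Nat.minFac_prime (by omega)
          have hge : d ≤ m.minFac := by
            by_contra h
            exact hinv _ hmfp.two_le (by omega) (Nat.minFac_dvd m)
          nlinarith [hsq, hge, hdd]
        show pvWrapB ((m : Int), fd) = _
        unfold pvWrapB
        rw [if_pos (by push_cast; omega)]
        rw [Nat.primeFactorsList_prime hprime]
        unfold pvS
        have hded : PySem.List.dedup [m] = [m] := rfl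
        rw [hded]
        simp [pvFInc, PySem.List.count_eq]

-- ===== VERDICT (by name: the statement is the Claim_ definition above) =====
theorem is_economical_spec : Claim_equal_is_economical := by
  intro n _ hpre
  unfold Spec_is_economical
  unfold Pre_is_economical at hpre
  lift n to ℕ using (by omega : (0 : Int) ≤ n) with m
  have hm1 : 1 ≤ m := by exact_mod_cast hpre
  simp only [is_economical, is_economical_alt]
  have hf1 : (2 * (m : Int) + 4).toNat = 2 * m + 4 := by omega
  have hf2 : ((m : Int) + 4).toNat = m + 4 := by omega
  rw [hf1, hf2]
  have h2c : ((2 : Nat) : Int) = (2 : Int) := by norm_num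
  have hA := pvLoopA_eq (2 * m + 4) m 2 [] hm1 (by omega) Nat.prime_two
    (fun q hq hql => absurd hq.two_le (by omega)) (by omega)
  rw [h2c] at hA
  rw [hA, List.nil_append, pvNumberOfDigitsA_eq (Nat.primeFactorsList m)]
  have hB := pvLoopB_eq (m + 4) m 2 0 hm1 (by omega)
    (fun k hk2 hkd => by omega) (by omega)
  rw [h2c, zero_add] at hB
  unfold pvWrapB at hB
  rw [hB]
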